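-- pv_equiv track=rewrite | github.com/huitianbao/Python_study | ex2/18/test/1.3/test1.3.py | remove_digits
-- ===== SOURCE A (Python) =====
-- def list_to_string(list):
--     sum = ''
--     for l in list:
--         sum = sum + l
--     return sum
--
-- def remove_digits(x):
--     list_xx = list(x)
--     count_digits = 0
--     while count_digits <= (len(list_xx) - 1):
--         if list_xx[count_digits] >= '0' and list_xx[count_digits] <= '9':
--             del list_xx[count_digits]
--         count_digits += 1
--     return list_to_string(list_xx)
-- ===== SOURCE B (Python) =====
-- def remove_digits(x):
--     return ''.join(ch for ch in x if not ('0' <= ch <= '9'))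
-- ===== Notes on version B (the rewrite author's own statement) =====
-- stated objective: simpler
-- what changed: Replaced the in-place delete-while-scanning loop and the quadratic string concatenation by a single filtering pass joined once.
-- intended difference: On strings containing two adjacent digits, A's delete-then-increment scan skips the character after each deleted digit and returns a string that still contains digits, while B removes every digit, which is the intended behaviour of a digit remover (witness: input 12, A keeps the second digit, B strips both). — e.g. on remove_digits("12"): A returns "2", B returns ""
import Mathlib
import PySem

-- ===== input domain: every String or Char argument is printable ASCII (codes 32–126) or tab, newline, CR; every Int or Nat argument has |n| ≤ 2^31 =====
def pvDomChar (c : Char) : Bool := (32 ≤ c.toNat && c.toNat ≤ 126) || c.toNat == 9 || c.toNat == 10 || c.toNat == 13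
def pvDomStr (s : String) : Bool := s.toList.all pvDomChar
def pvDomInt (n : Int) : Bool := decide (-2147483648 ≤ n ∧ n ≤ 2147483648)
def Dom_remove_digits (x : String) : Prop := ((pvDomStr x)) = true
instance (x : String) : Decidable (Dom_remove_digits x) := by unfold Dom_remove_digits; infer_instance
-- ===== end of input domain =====

-- B is the plain digit-stripping filter; A agrees with it except on strings with two
-- adjacent digits, where A's delete-then-increment scan leaves digits behind (D_ below).

-- ===== PORT A =====
-- Python list_to_string: fold string concatenation over the characters
def pvListToString (l : List Char) : String :=
  l.foldl (fun s c => s ++ String.singleton c) ""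

-- the while loop: state (list_xx, count_digits); del list_xx[i] = eraseIdx
def pvRemoveLoop (xs : List Char) (i : Nat) : List Char :=
  if h : i < xs.length then
    if '0' ≤ xs[i] ∧ xs[i] ≤ '9' then
      pvRemoveLoop (xs.eraseIdx i) (i + 1)
    else
      pvRemoveLoop xs (i + 1)
  else xs
termination_by xs.length - i
decreasing_by
  · simp [List.length_eraseIdx, h]; omega
  · omega

def remove_digits (x : String) : String :=
  pvListToString (pvRemoveLoop x.toList 0)

-- ===== PORT B =====
-- Source B: ''.join(ch for ch in x if not ('0' <= ch <= '9'))
def remove_digits_alt (x : String) : String :=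
  String.ofList (x.toList.filter (fun c => !('0' ≤ c && c ≤ '9')))

-- ===== PRECONDITION & SPEC =====
def pvHasAdj : List Char → Bool
  | c :: d :: rest => (Char.isDigit c && Char.isDigit d) || pvHasAdj (d :: rest)
  | _ => false

-- On strings with two adjacent digits A's delete-then-increment scan skips the character
-- after each deleted digit and returns a string still containing digits (A "12" = "2"),
-- while B removes every digit (B "12" = ""), the intended behaviour of a digit remover.
def D_remove_digits (x : String) : Prop := pvHasAdj x.toList = true
instance (x : String) : Decidable (D_remove_digits x) := by unfold D_remove_digits; infer_instance

def Spec_remove_digits (x : String) (out : String) : Prop := ¬ D_remove_digits x → out = remove_digits_alt x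
instance (x : String) (out : String) : Decidable (Spec_remove_digits x out) := by unfold Spec_remove_digits; infer_instance

def pvDiffWitness_remove_digits : String := "12"
def pvDiffWitnessOut_remove_digits : String × String := ("2", "")

-- ===== CLAIM (what is proved, stated in full; the proofs are below) =====
def Claim_unchanged_remove_digits : Prop := ∀ (x : String), Dom_remove_digits x → Spec_remove_digits x (remove_digits x)
def Claim_changed_remove_digits : Prop := Dom_remove_digits (pvDiffWitness_remove_digits) ∧ D_remove_digits (pvDiffWitness_remove_digits) ∧ remove_digits (pvDiffWitness_remove_digits) = pvDiffWitnessOut_remove_digits.1 ∧ remove_digits_alt (pvDiffWitness_remove_digits) = pvDiffWitnessOut_remove_digits.2 ∧ pvDiffWitnessOut_remove_digits.1 ≠ pvDiffWitnessOut_remove_digits.2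
def Claim_exact_remove_digits : Prop := ∀ (x : String), Dom_remove_digits x → D_remove_digits x → remove_digits x ≠ remove_digits_alt x

-- ===== LEMMAS AND PROOFS =====

-- structural description of what A's delete-then-increment scan keeps:
-- flag true = the previous character was a deleted digit, so this one is kept unexamined
def pvAlt : List Char → Bool → List Char
  | [], _ => []
  | c :: cs, true => c :: pvAlt cs false
  | c :: cs, false => if '0' ≤ c ∧ c ≤ '9' then pvAlt cs true else c :: pvAlt cs false

theorem pvListToString_eq (l : List Char) : ∀ s : String,
    l.foldl (fun s c => s ++ String.singleton c) s = s ++ String.ofList l := by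
  induction l with
  | nil => intro s; simp
  | cons c cs ih =>
    intro s
    simp only [List.foldl_cons, ih]
    apply String.toList_injective
    simp

theorem pvLoop_inv (xs : List Char) (i : Nat) :
    pvRemoveLoop xs i = xs.take i ++ pvAlt (xs.drop i) false := by
  induction xs, i using pvRemoveLoop.induct with
  | case1 xs i h hd ih =>
    rw [pvRemoveLoop, dif_pos h, if_pos hd, ih]
    have hlen : (xs.take i).length = i := by simp; omega
    rw [List.eraseIdx_eq_take_drop_succ, List.take_append, List.drop_append, hlen]
    have h1 : i + 1 - i = 1 := by omega
    rw [h1, List.take_of_length_le (by omega : (xs.take i).length ≤ i + 1),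
        List.drop_eq_nil_of_le (by omega : (xs.take i).length ≤ i + 1),
        List.drop_eq_getElem_cons h]
    cases hdrop : xs.drop (i + 1) with
    | nil => simp [pvAlt, hd]
    | cons d ds => simp [pvAlt, hd]
  | case2 xs i h hd ih =>
    rw [pvRemoveLoop]
    simp only [h, dif_pos, hd]
    rw [ih]
    have hdi : xs.drop i = xs[i] :: xs.drop (i + 1) := by
      rw [List.drop_eq_getElem_cons h]
    rw [hdi]
    have ht : xs.take (i + 1) = xs.take i ++ [xs[i]] := by
      rw [List.take_add_one]; simp [List.getElem?_eq_getElem h]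
    rw [ht, List.append_assoc, List.singleton_append]
    simp [pvAlt, hd]
  | case3 xs i h =>
    rw [pvRemoveLoop]
    rw [dif_neg h]
    have hle : xs.length ≤ i := by omega
    simp [List.take_of_length_le hle, List.drop_eq_nil_of_le hle, pvAlt]

theorem pvA_char (x : String) : remove_digits x = String.ofList (pvAlt x.toList false) := by
  unfold remove_digits pvListToString
  rw [pvLoop_inv, pvListToString_eq]
  simp

-- the adjacency condition propagated through the flag
def pvBad (xs : List Char) (b : Bool) : Bool :=
  cond b ((match xs with | [] => false | c :: _ => Char.isDigit c) || pvHasAdj xs) (pvHasAdj xs)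

theorem pvAlt_eq_filter : ∀ (xs : List Char) (b : Bool), pvBad xs b = false →
    pvAlt xs b = xs.filter (fun c => !Char.isDigit c) := by
  intro xs b
  induction xs, b using pvAlt.induct with
  | case1 b => intro _; simp [pvAlt]
  | case2 c cs ih =>
    intro hbad
    simp only [pvBad, cond_true, Bool.or_eq_false_iff] at hbad
    have hnd : Char.isDigit c = false := hbad.1
    have hcs : pvHasAdj cs = false := by
      cases cs with
      | nil => rfl
      | cons d ds =>
        have := hbad.2
        simp only [pvHasAdj, Bool.or_eq_false_iff] at this
        exact this.2
    simp [pvAlt, List.filter, hnd, ih (by simpa [pvBad] using hcs)]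
  | case3 c cs hd ih =>
    intro hbad
    have hdig : Char.isDigit c = true := by
      simp only [Char.isDigit, Bool.and_eq_true, decide_eq_true_iff]; exact ⟨hd.1, hd.2⟩
    simp only [pvBad, cond_false] at hbad
    have hbad' : pvBad cs true = false := by
      cases cs with
      | nil => rfl
      | cons d ds =>
        simp only [pvHasAdj, Bool.or_eq_false_iff] at hbad
        have h1 : Char.isDigit d = false := by
          have := hbad.1; simp [hdig] at this; exact this
        simp [pvBad, h1, hbad.2]
    simp [pvAlt, hd, List.filter, hdig, ih hbad']
  | case4 c cs hd ih =>
    intro hbad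
    have hnd : Char.isDigit c = false := by
      simp [Char.isDigit]
      intro h1
      by_contra h2
      exact hd ⟨h1, le_of_not_gt (by simpa using h2)⟩
    simp only [pvBad, cond_false] at hbad
    have hcs : pvHasAdj cs = false := by
      cases cs with
      | nil => rfl
      | cons d ds =>
        simp only [pvHasAdj, Bool.or_eq_false_iff] at hbad
        exact hbad.2
    simp [pvAlt, hd, List.filter, hnd, ih (by simpa [pvBad] using hcs)]

theorem pvAlt_has_digit : ∀ (xs : List Char) (b : Bool), pvBad xs b = true →
    ∃ c ∈ pvAlt xs b, Char.isDigit c = true := by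
  intro xs b
  induction xs, b using pvAlt.induct with
  | case1 b => intro h; cases b <;> simp [pvBad, pvHasAdj] at h
  | case2 c cs ih =>
    intro hbad
    simp only [pvBad, cond_true, Bool.or_eq_true] at hbad
    by_cases hdc : Char.isDigit c = true
    · exact ⟨c, by simp [pvAlt], hdc⟩
    · have hcs : pvHasAdj cs = true := by
        rcases hbad with h | h
        · exact absurd h hdc
        · cases cs with
          | nil => simp [pvHasAdj] at h
          | cons d ds =>
            simp only [pvHasAdj, Bool.or_eq_true] at h
            rcases h with h | h
            · exact absurd (Bool.and_elim_left h) hdc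
            · simpa [pvHasAdj] using h
      obtain ⟨e, he, hde⟩ := ih (by simpa [pvBad] using hcs)
      exact ⟨e, by simp [pvAlt]; exact Or.inr he, hde⟩
  | case3 c cs hd ih =>
    intro hbad
    simp only [pvBad, cond_false] at hbad
    have hdig : Char.isDigit c = true := by
      simp only [Char.isDigit, Bool.and_eq_true, decide_eq_true_iff]; exact ⟨hd.1, hd.2⟩
    have hbad' : pvBad cs true = true := by
      cases cs with
      | nil => simp [pvHasAdj] at hbad
      | cons d ds =>
        simp only [pvHasAdj, Bool.or_eq_true] at hbad
        rcases hbad with h | h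
        · simp [pvBad, Bool.and_elim_right h]
        · simp [pvBad, h]
    obtain ⟨e, he, hde⟩ := ih hbad'
    exact ⟨e, by simp [pvAlt, hd]; exact he, hde⟩
  | case4 c cs hd ih =>
    intro hbad
    simp only [pvBad, cond_false] at hbad
    have hcs : pvHasAdj cs = true := by
      cases cs with
      | nil => simp [pvHasAdj] at hbad
      | cons d ds =>
        simp only [pvHasAdj, Bool.or_eq_true] at hbad
        rcases hbad with h | h
        · exfalso
          have h1 := Bool.and_elim_left h
          simp [Char.isDigit] at h1
          exact hd ⟨h1.1, h1.2⟩
        · simpa [pvHasAdj] using h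
    obtain ⟨e, he, hde⟩ := ih (by simpa [pvBad] using hcs)
    exact ⟨e, by simp [pvAlt, hd]; exact Or.inr he, hde⟩

-- ===== VERDICT (by name: the statements are the Claim_ definitions above) =====
theorem remove_digits_spec : Claim_unchanged_remove_digits := by
  intro x _ hD
  unfold D_remove_digits at hD
  unfold remove_digits_alt
  rw [pvA_char, pvAlt_eq_filter x.toList false (by simpa [pvBad] using (Bool.not_eq_true _).mp hD)]
  rfl

theorem remove_digits_changed : Claim_changed_remove_digits := by
  unfold Claim_changed_remove_digits
  refine ⟨by decide, by decide, ?_, by decide, by decide⟩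
  rw [pvA_char]
  decide

theorem remove_digits_tight : Claim_exact_remove_digits := by
  intro x _ hD heq
  unfold D_remove_digits at hD
  obtain ⟨c, hc, hdc⟩ := pvAlt_has_digit x.toList false (by simpa [pvBad] using hD)
  rw [pvA_char] at heq
  unfold remove_digits_alt at heq
  have hlist : pvAlt x.toList false = x.toList.filter (fun c => !Char.isDigit c) := by
    have := congrArg String.toList heq
    simpa [Char.isDigit] using this
  rw [hlist] at hc
  have := List.of_mem_filter hc
  simp [hdc] at this
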